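-- pv_equiv track=rewrite | github.com/AndreiSkrypko/mental_final_new | mental_app/views.py | generate_abacus_columns
-- ===== SOURCE A (Python) =====
-- def generate_abacus_columns(number):
--     # Список для всех колонок
--     columns = []
--
--     while number > 0:
--         digit = number % 10
--
--         if digit == 0:
--             column = [[1, 0], [0, 1, 1, 1, 1]]
--         elif digit == 1:
--             column = [[1, 0], [1, 0, 1, 1, 1]]
--         elif digit == 2:
--             column = [[1, 0], [1, 1, 0, 1, 1]]
--         elif digit == 3:
--             column = [[1, 0], [1, 1, 1, 0, 1]]
--         elif digit == 4:
--             column = [[1, 0], [1, 1, 1, 1, 0]]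
--         elif digit == 5:
--             column = [[0, 1], [0, 1, 1, 1, 1]]
--         elif digit == 6:
--             column = [[0, 1], [1, 0, 1, 1, 1]]
--         elif digit == 7:
--             column = [[0, 1], [1, 1, 0, 1, 1]]
--         elif digit == 8:
--             column = [[0, 1], [1, 1, 1, 0, 1]]
--         elif digit == 9:
--             column = [[0, 1], [1, 1, 1, 1, 0]]
--
--         columns.insert(0, column)  # Вставляем колонку в начало (от младшего к старшему разряду)
--         number //= 10
--
--     return columns
-- ===== SOURCE B (Python) =====
-- TABLE = {
--     '0': [[1, 0], [0, 1, 1, 1, 1]],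
--     '1': [[1, 0], [1, 0, 1, 1, 1]],
--     '2': [[1, 0], [1, 1, 0, 1, 1]],
--     '3': [[1, 0], [1, 1, 1, 0, 1]],
--     '4': [[1, 0], [1, 1, 1, 1, 0]],
--     '5': [[0, 1], [0, 1, 1, 1, 1]],
--     '6': [[0, 1], [1, 0, 1, 1, 1]],
--     '7': [[0, 1], [1, 1, 0, 1, 1]],
--     '8': [[0, 1], [1, 1, 1, 0, 1]],
--     '9': [[0, 1], [1, 1, 1, 1, 0]],
-- }
--
--
-- def generate_abacus_columns(number):
--     if number <= 0:
--         return []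
--     return [TABLE[c] for c in str(number)]
-- ===== Notes on version B (the rewrite author's own statement) =====
-- stated objective: idiomatic
-- what changed: Replaced the while-loop of divmod steps, the long elif chain and repeated insert-at-front by a digit-to-column dict built once and a left-to-right comprehension over str(number).
import Mathlib
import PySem

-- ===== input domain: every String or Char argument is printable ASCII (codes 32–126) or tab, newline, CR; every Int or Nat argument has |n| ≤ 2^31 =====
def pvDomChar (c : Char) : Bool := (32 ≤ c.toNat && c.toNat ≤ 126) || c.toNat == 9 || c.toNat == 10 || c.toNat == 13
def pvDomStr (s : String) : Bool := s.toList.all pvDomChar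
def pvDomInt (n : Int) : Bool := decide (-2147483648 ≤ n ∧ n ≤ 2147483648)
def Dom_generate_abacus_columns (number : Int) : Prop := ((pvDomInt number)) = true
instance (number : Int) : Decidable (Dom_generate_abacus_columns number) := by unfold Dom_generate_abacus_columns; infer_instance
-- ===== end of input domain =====

-- B replaces A's divmod loop + elif chain + insert(0) by a digit→column table and a
-- left-to-right map over str(number) (idiomatic; same cost).


-- ===== PORT A =====
-- the if/elif chain on `digit`; `digit` is always number % 10 with number > 0, so it lies
-- in 0..9 and the final `else` branch (Python: `column` stays unbound, unreachable) is junk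
def gaColOf (digit : Int) : List (List Int) :=
  if digit = 0 then [[1, 0], [0, 1, 1, 1, 1]]
  else if digit = 1 then [[1, 0], [1, 0, 1, 1, 1]]
  else if digit = 2 then [[1, 0], [1, 1, 0, 1, 1]]
  else if digit = 3 then [[1, 0], [1, 1, 1, 0, 1]]
  else if digit = 4 then [[1, 0], [1, 1, 1, 1, 0]]
  else if digit = 5 then [[0, 1], [0, 1, 1, 1, 1]]
  else if digit = 6 then [[0, 1], [1, 0, 1, 1, 1]]
  else if digit = 7 then [[0, 1], [1, 1, 0, 1, 1]]
  else if digit = 8 then [[0, 1], [1, 1, 1, 0, 1]]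
  else if digit = 9 then [[0, 1], [1, 1, 1, 1, 0]]
  else []

-- the while loop; columns.insert(0, column) is column :: columns
def gaGo (number : Int) (columns : List (List (List Int))) : List (List (List Int)) :=
  if _h : 0 < number then
    gaGo (PySem.Int.floordiv number 10) (gaColOf (PySem.Int.mod number 10) :: columns)
  else columns
termination_by number.toNat
decreasing_by
  have hd : PySem.Int.floordiv number 10 = number / 10 := by
    simp [PySem.Int.floordiv, Int.fdiv_eq_ediv]
  rw [hd]; omega

def generate_abacus_columns (number : Int) : List (List (List Int)) :=
  gaGo number []

-- ===== PORT B =====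
def gaTable : PySem.Dict Char (List (List Int)) := PySem.Dict.mk
  [ ('0', [[1, 0], [0, 1, 1, 1, 1]])
  , ('1', [[1, 0], [1, 0, 1, 1, 1]])
  , ('2', [[1, 0], [1, 1, 0, 1, 1]])
  , ('3', [[1, 0], [1, 1, 1, 0, 1]])
  , ('4', [[1, 0], [1, 1, 1, 1, 0]])
  , ('5', [[0, 1], [0, 1, 1, 1, 1]])
  , ('6', [[0, 1], [1, 0, 1, 1, 1]])
  , ('7', [[0, 1], [1, 1, 0, 1, 1]])
  , ('8', [[0, 1], [1, 1, 1, 0, 1]])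
  , ('9', [[0, 1], [1, 1, 1, 1, 0]])
  ]

-- TABLE[c]: for number > 0 every char of str(number) is a decimal digit, so the key is
-- always present and the (unreachable) KeyError default [] is never returned
def generate_abacus_columns_alt (number : Int) : List (List (List Int)) :=
  if number ≤ 0 then []
  else (PySem.Int.toStr number).toList.map (fun c => PySem.Dict.getD gaTable c [])

-- ===== PRECONDITION & SPEC =====
def Spec_generate_abacus_columns (number : Int) (out : List (List (List Int))) : Prop := out = generate_abacus_columns_alt number
instance (number : Int) (out : List (List (List Int))) : Decidable (Spec_generate_abacus_columns number out) := by unfold Spec_generate_abacus_columns; infer_instance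

-- ===== CLAIM (what is proved, stated in full; the proofs are below) =====
def Claim_equal_generate_abacus_columns : Prop := ∀ (number : Int), Dom_generate_abacus_columns number → Spec_generate_abacus_columns number (generate_abacus_columns number)

-- ===== LEMMAS AND PROOFS =====

-- the digit characters of n, most significant first (proof-side characterisation)
def msd (n : ℕ) : List Char :=
  if n < 10 then [n.digitChar] else msd (n / 10) ++ [(n % 10).digitChar]

lemma tdc_msd (n : ℕ) : ∀ (f : ℕ) (ds : List Char), n < f →
    Nat.toDigitsCore 10 f n ds = msd n ++ ds := by
  induction n using Nat.strong_induction_on with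
  | _ n ih =>
    intro f ds hf
    match f with
    | f + 1 =>
      simp only [Nat.toDigitsCore]
      by_cases h : n / 10 = 0
      · rw [if_pos h]
        conv_rhs => rw [msd]
        rw [if_pos (by omega), Nat.mod_eq_of_lt (by omega)]
        simp
      · rw [if_neg h, ih (n / 10) (by omega) f _ (by omega)]
        conv_rhs => rw [msd]
        rw [if_neg (by omega)]
        simp

lemma toDigits_msd (n : ℕ) : Nat.toDigits 10 n = msd n := by
  rw [Nat.toDigits, tdc_msd n (n + 1) [] (by omega)]
  simp

-- B's per-character lookup agrees with A's elif chain on actual digits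
lemma dig_eq_colOf (d : ℕ) (hd : d < 10) :
    PySem.Dict.getD gaTable d.digitChar [] = gaColOf (d : Int) := by
  interval_cases d <;> decide

-- A's loop produces the mapped digit string, most significant first
lemma gaGo_eq (n : ℕ) : ∀ (acc : List (List (List Int))), 0 < n →
    gaGo (n : Int) acc
      = (msd n).map (fun c => PySem.Dict.getD gaTable c []) ++ acc := by
  induction n using Nat.strong_induction_on with
  | _ n ih =>
    intro acc hn
    rw [gaGo.eq_def]
    have hpos : (0 : Int) < (n : Int) := by exact_mod_cast hn
    rw [dif_pos hpos]
    have hfd : PySem.Int.floordiv (n : Int) 10 = ((n / 10 : ℕ) : Int) := by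
      rw [PySem.Int.floordiv, Int.fdiv_eq_ediv, if_pos (Or.inl (by norm_num : (0:ℤ) ≤ 10))]
      omega
    have hmd : PySem.Int.mod (n : Int) 10 = ((n % 10 : ℕ) : Int) := by
      rw [PySem.Int.mod, Int.fmod_eq_emod, if_pos (Or.inl (by norm_num : (0:ℤ) ≤ 10))]
      omega
    rw [hfd, hmd]
    by_cases hsmall : n < 10
    · have h0 : n / 10 = 0 := by omega
      have hmod : n % 10 = n := by omega
      rw [h0, hmod, msd, if_pos hsmall]
      rw [gaGo.eq_def]
      simp [dig_eq_colOf n hsmall]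
    · rw [ih (n / 10) (by omega) _ (by omega)]
      conv_rhs => rw [msd]
      rw [if_neg (by omega)]
      simp [dig_eq_colOf (n % 10) (by omega)]

-- ===== VERDICT (by name: the statement is the Claim_ definition above) =====
theorem generate_abacus_columns_spec : Claim_equal_generate_abacus_columns := by
  intro number _
  unfold Spec_generate_abacus_columns generate_abacus_columns generate_abacus_columns_alt
  by_cases h : number ≤ 0
  · rw [gaGo.eq_def, dif_neg (by omega), if_pos h]
  · rw [if_neg h]
    have hn : number = ((number.toNat : ℕ) : Int) := by omega
    have hpos : 0 < number.toNat := by omega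
    rw [hn, gaGo_eq number.toNat [] hpos]
    have hch : (PySem.Int.toStr ((number.toNat : ℕ) : Int)).toList = msd number.toNat := by
      rw [PySem.Int.toList_toStr]
      rw [show PySem.Int.toChars ((number.toNat : ℕ) : Int)
            = Nat.toDigits 10 (((number.toNat : ℕ) : Int)).toNat from by
        simp [PySem.Int.toChars]]
      rw [Int.toNat_natCast, toDigits_msd]
    rw [hch]
    simp
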